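-- pv_equiv track=rewrite | github.com/thompsontmnt/whs-scheduler | scheduler/expression.py | _contiguous_ranges
-- ===== SOURCE A (Python) =====
-- def _contiguous_ranges(values: list[int]) -> list[tuple[int, int]]:
--     """Convert sorted ints to contiguous ranges: [1,2,4] -> [(1,2), (4,4)]."""
--     if not values:
--         return []
--     ranges: list[tuple[int, int]] = []
--     start = values[0]
--     prev = values[0]
--     for value in values[1:]:
--         if value == prev + 1:
--             prev = value
--             continue
--         ranges.append((start, prev))
--         start = value
--         prev = value
--     ranges.append((start, prev))
--     return ranges
-- ===== SOURCE B (Python) =====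
-- def _contiguous_ranges(values: list[int]) -> list[tuple[int, int]]:
--     """Convert sorted ints to contiguous ranges: [1,2,4] -> [(1,2), (4,4)]."""
--     if not values:
--         return []
--     breaks = [(a, b) for a, b in zip(values, values[1:]) if b != a + 1]
--     starts = [values[0]] + [b for _, b in breaks]
--     ends = [a for a, _ in breaks] + [values[-1]]
--     return list(zip(starts, ends))
-- ===== Notes on version B (the rewrite author's own statement) =====
-- stated objective: idiomatic
-- what changed: Replaces A's stateful running scan (start/prev accumulator with mid-loop emission) by a stateless pairwise decomposition: zip adjacent elements to find the break boundaries, then zip the derived start and end lists into the result.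
import Mathlib
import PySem

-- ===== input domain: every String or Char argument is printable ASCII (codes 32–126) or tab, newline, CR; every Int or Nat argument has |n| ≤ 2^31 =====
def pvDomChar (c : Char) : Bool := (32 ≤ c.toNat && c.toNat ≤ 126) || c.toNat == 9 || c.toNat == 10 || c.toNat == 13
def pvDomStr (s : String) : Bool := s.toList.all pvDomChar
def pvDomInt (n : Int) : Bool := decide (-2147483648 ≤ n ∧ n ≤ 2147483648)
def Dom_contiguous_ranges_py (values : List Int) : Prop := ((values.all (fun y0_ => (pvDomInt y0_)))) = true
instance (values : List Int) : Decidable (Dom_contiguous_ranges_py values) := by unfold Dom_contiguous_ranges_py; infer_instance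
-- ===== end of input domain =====

-- B replaces A's stateful running scan by a stateless pairwise decomposition
-- (break boundaries from zipping adjacent elements, then zipping starts with ends); objective: idiomatic.


-- ===== PORT A =====
-- one iteration of A's for-loop over state (ranges, start, prev)
def aStep (st : List (Int × Int) × Int × Int) (value : Int) : List (Int × Int) × Int × Int :=
  match st with
  | (ranges, start, prev) =>
    if value = prev + 1 then (ranges, start, value)
    else (ranges ++ [(start, prev)], value, value)

def contiguous_ranges_py (values : List Int) : List (Int × Int) :=
  match values with
  | [] => []
  | v0 :: rest =>
    match rest.foldl aStep ([], v0, v0) with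
    | (ranges, start, prev) => ranges ++ [(start, prev)]

-- ===== PORT B =====
def contiguous_ranges_py_alt (values : List Int) : List (Int × Int) :=
  match values with
  | [] => []
  | v0 :: rest =>
    let breaks := ((v0 :: rest).zip rest).filter (fun p => p.2 ≠ p.1 + 1)
    let starts := v0 :: breaks.map Prod.snd
    let ends := breaks.map Prod.fst ++ [(v0 :: rest).getLast (by simp)]
    starts.zip ends

-- ===== PRECONDITION & SPEC =====
def Spec_contiguous_ranges_py (values : List Int) (out : List (Int × Int)) : Prop := out = contiguous_ranges_py_alt values
instance (values : List Int) (out : List (Int × Int)) : Decidable (Spec_contiguous_ranges_py values out) := by unfold Spec_contiguous_ranges_py; infer_instance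

-- ===== CLAIM (what is proved, stated in full; the proofs are below) =====
def Claim_equal_contiguous_ranges_py : Prop := ∀ (values : List Int), Dom_contiguous_ranges_py values → Spec_contiguous_ranges_py values (contiguous_ranges_py values)

-- ===== LEMMAS AND PROOFS =====

-- Invariant of A's loop: prev is always the element just processed, so the tail of
-- the iteration together with (start, prev) determines the zip-based result of B.
lemma loop_eq (rest : List Int) : ∀ (acc : List (Int × Int)) (start p : Int),
    (match rest.foldl aStep (acc, start, p) with
     | (r, s, q) => r ++ [(s, q)]) =
    acc ++ (start :: (((p :: rest).zip rest).filter (fun x => x.2 ≠ x.1 + 1)).map Prod.snd).zip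
      ((((p :: rest).zip rest).filter (fun x => x.2 ≠ x.1 + 1)).map Prod.fst
        ++ [(p :: rest).getLast (by simp)]) := by
  induction rest with
  | nil => intro acc start p; simp
  | cons v vs ih =>
    intro acc start p
    by_cases h : v = p + 1
    · have := ih acc start v
      simp only [List.foldl_cons, aStep, h, if_true] at this ⊢
      rw [this]
      have hz : ((p :: v :: vs).zip (v :: vs)) = (p, v) :: ((v :: vs).zip vs) := rfl
      simp [List.getLast]
    · have := ih (acc ++ [(start, p)]) v v
      simp only [List.foldl_cons, aStep, if_neg h] at this ⊢
      rw [this]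
      have hz : ((p :: v :: vs).zip (v :: vs)) = (p, v) :: ((v :: vs).zip vs) := rfl
      simp [h, List.getLast, List.zip]

-- ===== VERDICT (by name: the statement is the Claim_ definition above) =====
theorem contiguous_ranges_py_spec : Claim_equal_contiguous_ranges_py := by
  intro values _
  unfold Spec_contiguous_ranges_py contiguous_ranges_py contiguous_ranges_py_alt
  cases values with
  | nil => rfl
  | cons v0 rest => exact loop_eq rest [] v0 v0
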